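-- pv_equiv track=rewrite | github.com/ZacZhang-H/University-timetable-OR | utility_functions.py | calculate_conflict_occurrences
-- ===== SOURCE A (Python) =====
-- def calculate_conflict_occurrences(timetable):
--     """
--     Calculate the number of time slots in the timetable that have scheduling conflicts.
--
--     A conflict is defined as two or more courses being scheduled at the same time and day.
--
--     Args:
--     - timetable: The timetable containing course scheduling information.
--
--     Returns:
--     - The number of time slots with conflicts.
--     """
--     time_slots = {}
--     for course, room, day, start_hour, _ in timetable:
--         key = (day, start_hour)
--         if key not in time_slots:
--             time_slots[key] = set()
--         time_slots[key].add(course)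
--
--     conflict_occurrences = sum(len(courses) > 1 for courses in time_slots.values())
--     return conflict_occurrences
-- ===== SOURCE B (Python) =====
-- def calculate_conflict_occurrences(timetable):
--     # Partition scheme: repeatedly take the first remaining slot, extract the
--     # whole group of rows scheduled at that slot, and drop it from the pool.
--     rows = [(day, start_hour, course) for course, room, day, start_hour, _ in timetable]
--     conflicts = 0
--     while rows:
--         d, h, _ = rows[0]
--         group = [c for (x, y, c) in rows if x == d and y == h]
--         rows = [t for t in rows if not (t[0] == d and t[1] == h)]
--         distinct = []
--         for c in group:
--             if c not in distinct:
--                 distinct.append(c)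
--         if len(distinct) > 1:
--             conflicts += 1
--     return conflicts
-- ===== Notes on version B (the rewrite author's own statement) =====
-- stated objective: alternative
-- what changed: Replaces A's single pass that maintains a hash dict of per-slot course sets with a hash-free partition loop: repeatedly take the first remaining row's (day, start_hour) slot, extract that slot's whole group, count its distinct courses by list scan, and drop the group from the pool.
import Mathlib
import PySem

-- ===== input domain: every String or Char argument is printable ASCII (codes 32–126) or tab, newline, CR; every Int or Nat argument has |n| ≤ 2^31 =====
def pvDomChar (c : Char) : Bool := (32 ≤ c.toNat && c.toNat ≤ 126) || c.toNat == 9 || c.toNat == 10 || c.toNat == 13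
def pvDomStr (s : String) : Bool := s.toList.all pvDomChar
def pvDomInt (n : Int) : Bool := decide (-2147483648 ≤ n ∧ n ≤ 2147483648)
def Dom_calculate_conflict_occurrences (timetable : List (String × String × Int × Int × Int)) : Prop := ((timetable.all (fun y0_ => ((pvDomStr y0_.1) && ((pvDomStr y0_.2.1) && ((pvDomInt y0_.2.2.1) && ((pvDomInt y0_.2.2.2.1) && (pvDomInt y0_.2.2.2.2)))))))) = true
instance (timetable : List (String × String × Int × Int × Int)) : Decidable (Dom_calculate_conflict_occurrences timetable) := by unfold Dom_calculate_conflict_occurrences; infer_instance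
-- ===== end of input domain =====

-- B replaces A's dict-of-sets single pass by a hash-free partition loop (extract one slot's
-- whole group at a time, drop it from the pool); objective: alternative algorithm, not claimed faster.

-- ===== PORT A =====
def calculate_conflict_occurrences (timetable : List (String × String × Int × Int × Int)) : Int :=
  let time_slots : PySem.Dict (Int × Int) (PySem.Set String) :=
    timetable.foldl (fun ts row =>
      -- for course, room, day, start_hour, _ in timetable
      let course := row.1
      let key : Int × Int := (row.2.2.1, row.2.2.2.1)
      let ts := if ts.contains key then ts else ts.insert key PySem.Set.empty
      ts.modify key PySem.Set.empty (fun s => PySem.Set.add s course)) PySem.Dict.empty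
  (time_slots.values.map (fun courses => if 1 < courses.length then (1 : Int) else 0)).sum

-- ===== PORT B =====
-- the while loop of Source B as recursion on the shrinking pool `rows`
def pvConflictGo : List (Int × Int × String) → Int
  | [] => 0
  | r :: rest =>
    let group := ((r :: rest).filter (fun t => t.1 == r.1 && t.2.1 == r.2.1)).map (fun t => t.2.2)
    let rows' := (r :: rest).filter (fun t => !(t.1 == r.1 && t.2.1 == r.2.1))
    let distinct := group.foldl (fun acc c => if acc.contains c then acc else acc ++ [c]) ([] : List String)
    (if 1 < distinct.length then (1 : Int) else 0) + pvConflictGo rows'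
termination_by rows => rows.length
decreasing_by
  simp only [List.filter_cons, beq_self_eq_true, Bool.and_self, Bool.not_true, List.length_cons]
  exact Nat.lt_succ_of_le (List.length_filter_le _ _)

def calculate_conflict_occurrences_alt (timetable : List (String × String × Int × Int × Int)) : Int :=
  pvConflictGo (timetable.map (fun row => (row.2.2.1, row.2.2.2.1, row.1)))

-- ===== PRECONDITION & SPEC =====
def Spec_calculate_conflict_occurrences (timetable : List (String × String × Int × Int × Int)) (out : Int) : Prop := out = calculate_conflict_occurrences_alt timetable
instance (timetable : List (String × String × Int × Int × Int)) (out : Int) : Decidable (Spec_calculate_conflict_occurrences timetable out) := by unfold Spec_calculate_conflict_occurrences; infer_instance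

-- ===== CLAIM =====
def Claim_equal_calculate_conflict_occurrences : Prop := ∀ (timetable : List (String × String × Int × Int × Int)), Dom_calculate_conflict_occurrences timetable → Spec_calculate_conflict_occurrences timetable (calculate_conflict_occurrences timetable)

-- ===== LEMMAS AND PROOFS =====

-- common specification: slots in first-occurrence order, counted iff more than one distinct course
def pvCoursesAt (rows : List (Int × Int × String)) (k : Int × Int) : List String :=
  PySem.Set.ofList ((rows.filter (fun t => (t.1, t.2.1) == k)).map (fun t => t.2.2))

def pvS (rows : List (Int × Int × String)) : Int :=
  (((PySem.Set.ofList (rows.map (fun t => (t.1, t.2.1)))).countP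
      (fun k => 1 < (pvCoursesAt rows k).length) : Nat) : Int)

lemma pv_foldl_dedup_eq_ofList (xs : List String) :
    xs.foldl (fun acc c => if acc.contains c then acc else acc ++ [c]) ([] : List String)
      = PySem.Set.ofList xs := by
  rw [PySem.Set.ofList_eq_foldl]
  rfl

lemma pv_discard_add_self {s : PySem.Set (Int × Int)} {k : Int × Int} :
    (s.add k).discard k = s.discard k := by
  rw [PySem.Set.add_eq_ite]
  split_ifs with h
  · rfl
  · simp [PySem.Set.discard, List.filter_append]

lemma pv_discard_add_of_ne {s : PySem.Set (Int × Int)} {x k : Int × Int} (h : x ≠ k) :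
    (s.add x).discard k = (s.discard k).add x := by
  rw [PySem.Set.add_eq_ite, PySem.Set.add_eq_ite]
  by_cases hm : x ∈ s
  · rw [if_pos hm, if_pos ((PySem.Set.mem_discard s k x).mpr ⟨hm, h⟩)]
  · have hm2 : x ∉ s.discard k := fun hx => hm ((PySem.Set.mem_discard s k x).mp hx).1
    rw [if_neg hm, if_neg hm2]
    simp [PySem.Set.discard, List.filter_append, h]

lemma pv_ofList_filter_ne (l : List (Int × Int)) (k : Int × Int) :
    PySem.Set.ofList (l.filter (fun x => !(x == k)))
      = (PySem.Set.ofList l).discard k := by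
  induction l using List.reverseRecOn with
  | nil => rfl
  | append_singleton l x ih =>
    rw [List.filter_append, PySem.Set.ofList_append_singleton]
    by_cases hxk : x = k
    · subst hxk
      simp only [List.filter_cons, List.filter_nil, beq_self_eq_true, Bool.not_true,
        Bool.false_eq_true, if_false, List.append_nil]
      rw [ih, pv_discard_add_self]
    · have hb : (x == k) = false := by simp [hxk]
      simp only [List.filter_cons, List.filter_nil, hb, Bool.not_false, if_true]
      rw [PySem.Set.ofList_append_singleton, ih, pv_discard_add_of_ne hxk]

lemma pv_coursesAt_filter_ne (r : Int × Int × String) (rest : List (Int × Int × String))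
    (k : Int × Int) (hk : k ≠ (r.1, r.2.1)) :
    pvCoursesAt (rest.filter (fun t => !((t.1, t.2.1) == (r.1, r.2.1)))) k
      = pvCoursesAt (r :: rest) k := by
  unfold pvCoursesAt
  congr 1
  have hhead : ¬ ((r.1, r.2.1) : Int × Int) = k := fun h => hk h.symm
  rw [List.filter_filter, List.filter_cons, if_neg (by simp [hhead])]
  congr 1
  refine List.filter_congr ?_
  intro t _
  by_cases ht : ((t.1, t.2.1) : Int × Int) = k
  · simp [ht]
    exact hk
  · simp [ht]

lemma pv_S_cons (r : Int × Int × String) (rest : List (Int × Int × String)) :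
    pvS (r :: rest)
      = (if 1 < (pvCoursesAt (r :: rest) (r.1, r.2.1)).length then (1 : Int) else 0)
        + pvS (rest.filter (fun t => !((t.1, t.2.1) == (r.1, r.2.1)))) := by
  unfold pvS
  rw [List.map_cons, PySem.Set.ofList_cons]
  have hmf : (rest.map (fun t => ((t.1, t.2.1) : Int × Int))).filter (fun x => !(x == (r.1, r.2.1)))
      = (rest.filter (fun t => !((t.1, t.2.1) == (r.1, r.2.1)))).map (fun t => (t.1, t.2.1)) := by
    rw [List.filter_map]
    rfl
  have hD : PySem.Set.ofList
      ((rest.filter (fun t => !((t.1, t.2.1) == (r.1, r.2.1)))).map (fun t => (t.1, t.2.1)))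
      = (PySem.Set.ofList (rest.map (fun t => (t.1, t.2.1)))).discard (r.1, r.2.1) := by
    rw [← hmf]
    exact pv_ofList_filter_ne _ _
  rw [hD]
  have hpp : ((PySem.Set.ofList (rest.map (fun t => (t.1, t.2.1)))).discard (r.1, r.2.1)).countP
        (fun k => 1 < (pvCoursesAt (rest.filter (fun t => !((t.1, t.2.1) == (r.1, r.2.1)))) k).length)
      = ((PySem.Set.ofList (rest.map (fun t => (t.1, t.2.1)))).discard (r.1, r.2.1)).countP
        (fun k => 1 < (pvCoursesAt (r :: rest) k).length) := by
    refine List.countP_congr ?_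
    intro k hkmem
    have hk : k ≠ (r.1, r.2.1) := ((PySem.Set.mem_discard _ _ _).mp hkmem).2
    simp [pv_coursesAt_filter_ne r rest k hk]
  rw [List.countP_cons, hpp]
  by_cases hc : 1 < (pvCoursesAt (r :: rest) (r.1, r.2.1)).length
  · simp [hc]
    try ring
  · simp [hc]
    try ring

lemma pv_go_eq_S (rows : List (Int × Int × String)) : pvConflictGo rows = pvS rows := by
  induction hn : rows.length using Nat.strong_induction_on generalizing rows with
  | _ n ih =>
    match rows, hn with
    | [], _ =>
      simp only [pvConflictGo]
      simp [pvS]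
    | r :: rest, hn =>
      simp only [pvConflictGo]
      simp only [pv_foldl_dedup_eq_ofList]
      have hfilter : (r :: rest).filter (fun t => !(t.1 == r.1 && t.2.1 == r.2.1))
          = rest.filter (fun t => !((t.1, t.2.1) == (r.1, r.2.1))) := by
        rw [List.filter_cons, if_neg (by simp)]
        refine List.filter_congr ?_
        intro t _
        rfl
      have hgroup : (r :: rest).filter (fun t => t.1 == r.1 && t.2.1 == r.2.1)
          = (r :: rest).filter (fun t => (t.1, t.2.1) == (r.1, r.2.1)) := by
        refine List.filter_congr ?_
        intro t _
        rfl
      rw [hgroup, hfilter]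
      have hlen : (rest.filter (fun t => !((t.1, t.2.1) == (r.1, r.2.1)))).length < n := by
        have h1 := List.length_filter_le (fun t => !((t.1, t.2.1) == (r.1, r.2.1))) rest
        simp only [List.length_cons] at hn
        omega
      rw [ih _ hlen _ rfl, pv_S_cons r rest]
      rfl

-- A's loop body, named so the dict after the loop can be characterised
def pvStep (ts : PySem.Dict (Int × Int) (PySem.Set String)) (row : String × String × Int × Int × Int) : PySem.Dict (Int × Int) (PySem.Set String) :=
  let course := row.1
  let key : Int × Int := (row.2.2.1, row.2.2.2.1)
  let ts := if ts.contains key then ts else ts.insert key PySem.Set.empty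
  ts.modify key PySem.Set.empty (fun s => PySem.Set.add s course)

lemma pv_keys_fold (l : List (String × String × Int × Int × Int)) :
    (l.foldl pvStep PySem.Dict.empty).keys
      = PySem.Set.ofList (l.map (fun r => ((r.2.2.1, r.2.2.2.1) : Int × Int))) := by
  induction l using List.reverseRecOn with
  | nil => rfl
  | append_singleton l r ih =>
    rw [List.foldl_append, List.foldl_cons, List.foldl_nil, List.map_append]
    simp only [List.map_cons, List.map_nil]
    rw [PySem.Set.ofList_append_singleton, ← ih]
    set d := l.foldl pvStep PySem.Dict.empty with hd
    simp only [pvStep]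
    by_cases hc : d.contains (r.2.2.1, r.2.2.2.1)
    · have hk : ((r.2.2.1, r.2.2.2.1) : Int × Int) ∈ d.keys :=
        (PySem.Dict.contains_iff_mem_keys _ _).mp hc
      rw [if_pos hc, PySem.Dict.keys_modify, PySem.Dict.keys_insert_of_contains,
        PySem.Set.add_of_mem hk]
      exact hc
    · have hcf : d.contains ((r.2.2.1, r.2.2.2.1) : Int × Int) = false := by simpa using hc
      have hk : ((r.2.2.1, r.2.2.2.1) : Int × Int) ∉ d.keys := by
        intro hmem
        rw [(PySem.Dict.contains_iff_mem_keys d _).mpr hmem] at hcf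
        simp at hcf
      rw [if_neg hc, PySem.Dict.keys_modify, PySem.Dict.keys_insert_of_contains,
        PySem.Dict.keys_insert_of_not_contains, PySem.Set.add_of_not_mem hk]
      all_goals first
        | exact hcf
        | simp

lemma pv_getD_fold (l : List (String × String × Int × Int × Int)) (k : Int × Int) :
    (l.foldl pvStep PySem.Dict.empty).getD k PySem.Set.empty
      = PySem.Set.ofList ((l.filter (fun r => ((r.2.2.1, r.2.2.2.1) : Int × Int) == k)).map (fun r => r.1)) := by
  induction l using List.reverseRecOn with
  | nil => rfl
  | append_singleton l r ih =>
    rw [List.foldl_append, List.foldl_cons, List.foldl_nil, List.filter_append]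
    set d := l.foldl pvStep PySem.Dict.empty with hd
    have hstep : (pvStep d r).getD k PySem.Set.empty
        = if k = (r.2.2.1, r.2.2.2.1) then (d.getD k PySem.Set.empty).add r.1
          else d.getD k PySem.Set.empty := by
      simp only [pvStep]
      by_cases hc : d.contains (r.2.2.1, r.2.2.2.1)
      · rw [if_pos hc, PySem.Dict.getD_modify]
        by_cases hk : k = (r.2.2.1, r.2.2.2.1)
        · rw [if_pos hk, if_pos hk, hk]
        · rw [if_neg hk, if_neg hk]
      · have hcf : d.contains ((r.2.2.1, r.2.2.2.1) : Int × Int) = false := by simpa using hc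
        rw [if_neg hc, PySem.Dict.getD_modify]
        by_cases hk : k = (r.2.2.1, r.2.2.2.1)
        · rw [if_pos hk, if_pos hk, PySem.Dict.getD_insert, if_pos rfl, hk,
            PySem.Dict.getD_of_not_contains _ _ hcf]
        · rw [if_neg hk, if_neg hk, PySem.Dict.getD_insert, if_neg hk]
    rw [hstep]
    by_cases hk : k = (r.2.2.1, r.2.2.2.1)
    · rw [if_pos hk, List.filter_cons, if_pos (by simp [hk])]
      simp only [List.filter_nil, List.map_append, List.map_cons, List.map_nil]
      rw [PySem.Set.ofList_append_singleton, ih]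
    · have hb : ¬ ((r.2.2.1, r.2.2.2.1) : Int × Int) = k := fun h => hk h.symm
      rw [if_neg hk, List.filter_cons, if_neg (by simp [hb])]
      simp only [List.filter_nil, List.append_nil]
      exact ih

lemma pv_A_eq_S (timetable : List (String × String × Int × Int × Int)) :
    calculate_conflict_occurrences timetable
      = pvS (timetable.map (fun row => (row.2.2.1, row.2.2.2.1, row.1))) := by
  have hA : calculate_conflict_occurrences timetable
      = ((timetable.foldl pvStep PySem.Dict.empty).values.map
          (fun courses => if 1 < courses.length then (1 : Int) else 0)).sum := rfl
  rw [hA]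
  set d := timetable.foldl pvStep PySem.Dict.empty with hd
  have hnd : d.keys.Nodup := by
    rw [hd, pv_keys_fold]; exact PySem.Set.nodup_ofList _
  rw [PySem.Dict.values_eq_map_keys d hnd PySem.Set.empty, List.map_map]
  have hsum := PySem.List.sum_map_ite_one_zero
    (fun k => decide (1 < (d.getD k PySem.Set.empty).length)) d.keys
  simp only [decide_eq_true_eq] at hsum
  rw [show ((fun courses => if 1 < (courses : PySem.Set String).length then (1 : Int) else 0) ∘
      (fun k => d.getD k PySem.Set.empty))
      = (fun k => if 1 < (d.getD k PySem.Set.empty).length then (1 : Int) else 0) from rfl]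
  rw [hsum]
  unfold pvS
  congr 1
  have hkeys : d.keys = PySem.Set.ofList
      ((timetable.map (fun row => (row.2.2.1, row.2.2.2.1, row.1))).map (fun t => (t.1, t.2.1))) := by
    rw [hd, pv_keys_fold, List.map_map]
    rfl
  rw [hkeys]
  refine List.countP_congr ?_
  intro k _
  have hcourses : d.getD k ([] : PySem.Set String)
      = pvCoursesAt (timetable.map (fun row => (row.2.2.1, row.2.2.2.1, row.1))) k := by
    rw [hd]
    show (timetable.foldl pvStep PySem.Dict.empty).getD k PySem.Set.empty = _
    rw [pv_getD_fold]
    unfold pvCoursesAt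
    rw [List.filter_map, List.map_map]
    rfl
  simp [hcourses]

-- ===== VERDICT =====
theorem calculate_conflict_occurrences_spec : Claim_equal_calculate_conflict_occurrences := by
  intro timetable _
  unfold Spec_calculate_conflict_occurrences calculate_conflict_occurrences_alt
  rw [pv_A_eq_S, pv_go_eq_S]
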